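-- pv_equiv track=rewrite | github.com/sauravdwivedi/Python | MaxArraySum.py | max_sum_array
-- ===== SOURCE A (Python) =====
-- def max_sum_array(a):
--     """Method to calculate maximum sum in sub arrays"""
--     id_one = lambda i: [a[i+2*j] for j in range(len(a)) if i + 2*j < len(a)]
--     y = [id_one(i) for i in range(len(a)) if len(id_one(i)) >= 2]
--
--     for i in range(len(a)):
--         for j in range(len(a)):
--             if i+j+2 < len(a):
--                 z = [a[i]]
--                 z.append(a[i+j+2])
--                 y.append(z)
--     total = [sum(x) for x in y]
--     return max(total)
-- ===== SOURCE B (Python) =====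
-- def max_sum_array(a):
--     """Method to calculate maximum sum in sub arrays (O(n) one-pass version)."""
--     n = len(a)
--     # chain[i] = a[i] + a[i+2] + a[i+4] + ... computed by one backwards pass
--     chain = [0] * n
--     for i in range(n - 1, -1, -1):
--         chain[i] = a[i] + (chain[i + 2] if i + 2 < n else 0)
--     # candidates: full step-2 chains of length >= 2, then best 2-apart pair per endpoint
--     cands = chain[:n - 2]
--     if n >= 3:
--         pm = a[0]
--         for k in range(2, n):
--             cands.append(pm + a[k])
--             pm = max(pm, a[k - 1])
--     return max(cands)
-- ===== Notes on version B (the rewrite author's own statement) =====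
-- stated objective: faster
-- what changed: A enumerates all step-2 chains by a quadratic comprehension and all 2-apart pairs by two nested loops and takes the max of every candidate sum; B computes all chain sums in one backwards suffix pass (chain[i] = a[i] + chain[i+2]) and replaces the quadratic pair enumeration by a running prefix maximum, one candidate per right endpoint.
-- outside the precondition, e.g. on max_sum_array([]): A raises ValueError, B raises ValueError; on max_sum_array([1, 2]): A raises ValueError, B raises ValueError
import Mathlib
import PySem

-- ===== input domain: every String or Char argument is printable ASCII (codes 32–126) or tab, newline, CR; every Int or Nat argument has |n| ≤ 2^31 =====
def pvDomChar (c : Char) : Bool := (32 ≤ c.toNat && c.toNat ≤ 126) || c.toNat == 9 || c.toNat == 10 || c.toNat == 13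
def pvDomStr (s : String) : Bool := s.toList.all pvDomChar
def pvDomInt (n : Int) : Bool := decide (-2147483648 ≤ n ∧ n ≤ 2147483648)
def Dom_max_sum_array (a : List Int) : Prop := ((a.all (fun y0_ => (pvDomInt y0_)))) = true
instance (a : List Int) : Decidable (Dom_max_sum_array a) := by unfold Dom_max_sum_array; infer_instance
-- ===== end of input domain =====

-- B replaces A's quadratic candidate enumeration by one backwards suffix pass for the step-2
-- chain sums plus a running prefix-max for the 2-apart pair sums (objective: faster, O(n) vs O(n^2)).

-- ===== PORT A =====
def pvIdOne (a : List Int) (i : Int) : List Int :=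
  (PySem.List.pyRange 0 (a.length : Int) 1).foldl
    (fun acc j => if i + 2 * j < (a.length : Int) then acc ++ [PySem.List.pyGetD a (i + 2 * j) 0] else acc) []

def max_sum_array (a : List Int) : Int :=
  let y0 := (PySem.List.pyRange 0 (a.length : Int) 1).foldl
    (fun acc i => if 2 ≤ (pvIdOne a i).length then acc ++ [pvIdOne a i] else acc) []
  let y := (PySem.List.pyRange 0 (a.length : Int) 1).foldl
    (fun acc i => (PySem.List.pyRange 0 (a.length : Int) 1).foldl
      (fun acc2 j => if i + j + 2 < (a.length : Int) then
          acc2 ++ [[PySem.List.pyGetD a i 0, PySem.List.pyGetD a (i + j + 2) 0]] else acc2) acc) y0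
  let total := y.map List.sum
  (PySem.List.max? total (fun x => x)).getD 0

-- ===== PORT B =====
-- chain[i] = a[i] + chain[i+2] computed by the backwards pass of Source B, as suffix recursion
def pvChains : List Int → List Int
  | [] => []
  | x :: rest => (x + (pvChains rest).getD 1 0) :: pvChains rest

def max_sum_array_alt (a : List Int) : Int :=
  let n := a.length
  let chain := pvChains a
  let cands0 := chain.take (n - 2)
  let cands :=
    if 3 ≤ n then
      ((PySem.List.pyRange 2 (n : Int) 1).foldl
        (fun (st : List Int × Int) k =>
          (st.1 ++ [st.2 + PySem.List.pyGetD a k 0], max st.2 (PySem.List.pyGetD a (k - 1) 0)))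
        (cands0, PySem.List.pyGetD a 0 0)).1
    else cands0
  (PySem.List.max? cands (fun x => x)).getD 0

-- ===== PRECONDITION & SPEC =====
-- Pre_ excludes lists of fewer than 3 elements, on which Python's max([]) raises ValueError in A.
def Pre_max_sum_array (a : List Int) : Prop := 3 ≤ a.length
instance (a : List Int) : Decidable (Pre_max_sum_array a) := by unfold Pre_max_sum_array; infer_instance
def pvWitness_max_sum_array : List Int := [1, 2, 3]

def Spec_max_sum_array (a : List Int) (out : Int) : Prop := out = max_sum_array_alt a
instance (a : List Int) (out : Int) : Decidable (Spec_max_sum_array a out) := by unfold Spec_max_sum_array; infer_instance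

-- ===== CLAIM (what is proved, stated in full; the proofs are below) =====
def Claim_equal_max_sum_array : Prop := ∀ (a : List Int), Dom_max_sum_array a → Pre_max_sum_array a → Spec_max_sum_array a (max_sum_array a)

-- ===== LEMMAS AND PROOFS =====

def pvStep2 : List Int → List Int
  | [] => []
  | [x] => [x]
  | x :: _ :: r => x :: pvStep2 r

def pvCsum (l : List Int) : Int := (pvStep2 l).sum

theorem pvStep2_eq_map : ∀ (l : List Int),
    pvStep2 l = (List.range ((l.length + 1) / 2)).map (fun k => l.getD (2 * k) 0)
  | [] => by simp [pvStep2]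
  | [x] => by simp [pvStep2]
  | x :: y :: r => by
      have IH := pvStep2_eq_map r
      simp only [pvStep2, List.length_cons]
      have h2 : (r.length + 1 + 1 + 1) / 2 = (r.length + 1) / 2 + 1 := by omega
      rw [h2, List.range_succ_eq_map, List.map_cons, List.map_map]
      refine congrArg₂ _ rfl ?_
      rw [IH]
      apply List.map_congr_left
      intro k _
      have h3 : 2 * (k + 1) = 2 * k + 1 + 1 := by ring
      simp [Function.comp, h3]
theorem pvCsum_cons (x : Int) (rest : List Int) :
    pvCsum (x :: rest) = x + pvCsum (rest.drop 1) := by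
  cases rest with
  | nil => simp [pvCsum, pvStep2]
  | cons y r => simp [pvCsum, pvStep2]

theorem pvChains_eq : ∀ (a : List Int),
    pvChains a = (List.range a.length).map (fun i => pvCsum (a.drop i))
  | [] => by simp [pvChains]
  | x :: rest => by
      have IH := pvChains_eq rest
      have hget : (pvChains rest).getD 1 0 = pvCsum (rest.drop 1) := by
        rw [IH]
        match rest with
        | [] => simp [pvCsum, pvStep2]
        | [y] => simp [pvCsum, pvStep2]
        | y :: z :: r =>
            rw [List.getD_eq_getElem]
            · simp
            · simp
      simp only [pvChains, List.length_cons, List.range_succ_eq_map, List.map_cons, List.map_map]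
      refine congrArg₂ _ ?_ ?_
      · rw [hget]; simp [pvCsum_cons]
      · rw [IH]
        apply List.map_congr_left
        intro k _
        simp [Function.comp]
theorem pvIdOne_eq (a : List Int) (i : Nat) (h : i < a.length) :
    pvIdOne a (i : Int) = pvStep2 (a.drop i) := by
  have hm : ((a.length - i + 1) / 2 : Nat) ≤ a.length := by omega
  unfold pvIdOne
  rw [PySem.List.foldl_append_ite]
  rw [PySem.List.pyRange_one_append 0 ((a.length - i + 1) / 2 : Nat) (a.length : Int)
    (by positivity) (by exact_mod_cast hm)]
  rw [List.filter_append]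
  have h1 : (PySem.List.pyRange 0 ((a.length - i + 1) / 2 : Nat) 1).filter
      (fun j => decide ((i : Int) + 2 * j < (a.length : Int))) =
      PySem.List.pyRange 0 ((a.length - i + 1) / 2 : Nat) 1 := by
    apply List.filter_eq_self.mpr
    intro j hj
    rw [PySem.List.mem_pyRange_one] at hj
    simp only [decide_eq_true_eq]
    omega
  have h2 : (PySem.List.pyRange ((a.length - i + 1) / 2 : Nat) (a.length : Int) 1).filter
      (fun j => decide ((i : Int) + 2 * j < (a.length : Int))) = [] := by
    apply List.filter_eq_nil_iff.mpr
    intro j hj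
    rw [PySem.List.mem_pyRange_one] at hj
    simp only [decide_eq_true_eq]
    omega
  rw [h1, h2, List.append_nil, List.nil_append]
  rw [pvStep2_eq_map]
  rw [PySem.List.pyRange_zero_nat]
  rw [List.map_map]
  have hlen : ((a.drop i).length + 1) / 2 = (a.length - i + 1) / 2 := by
    simp
  rw [hlen]
  apply List.map_congr_left
  intro k hk
  rw [List.mem_range] at hk
  have hidx : (i : Int) + 2 * (k : Int) = ((i + 2 * k : Nat) : Int) := by push_cast; ring
  simp only [Function.comp]
  rw [hidx, PySem.List.pyGetD_natCast]
  rw [List.getD_eq_getElem?_getD, List.getD_eq_getElem?_getD, List.getElem?_drop]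
def pvPmax (a : List Int) (m : Nat) : Int :=
  (List.range m).foldl (fun acc j => max acc (a.getD (j + 1) 0)) (a.getD 0 0)

theorem pvPmax_succ (a : List Int) (m : Nat) :
    pvPmax a (m + 1) = max (pvPmax a m) (a.getD (m + 1) 0) := by
  simp [pvPmax, List.range_succ]

theorem pvPmax_le (a : List Int) (m i : Nat) (h : i ≤ m) : a.getD i 0 ≤ pvPmax a m := by
  induction m with
  | zero => interval_cases i; simp [pvPmax]
  | succ k ih =>
      rw [pvPmax_succ]
      rcases Nat.lt_or_ge i (k + 1) with hi | hi
      · exact le_trans (ih (by omega)) (le_max_left _ _)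
      · have : i = k + 1 := by omega
        subst this; exact le_max_right _ _
theorem pvPmax_mem (a : List Int) (m : Nat) : ∃ i ≤ m, pvPmax a m = a.getD i 0 := by
  induction m with
  | zero => exact ⟨0, le_refl _, rfl⟩
  | succ k ih =>
      rw [pvPmax_succ]
      obtain ⟨i, hi, he⟩ := ih
      rcases max_cases (pvPmax a k) (a.getD (k + 1) 0) with ⟨h1, _⟩ | ⟨h1, _⟩
      · exact ⟨i, by omega, by rw [h1, he]⟩
      · exact ⟨k + 1, le_refl _, h1⟩

theorem pvMax_eq_of_dominates (l1 l2 : List Int) (h1 : l1 ≠ []) (h2 : l2 ≠ [])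
    (d12 : ∀ x ∈ l1, ∃ y ∈ l2, x ≤ y) (d21 : ∀ y ∈ l2, ∃ x ∈ l1, y ≤ x) :
    PySem.List.max? l1 (fun x => x) = PySem.List.max? l2 (fun x => x) := by
  obtain ⟨p, hp⟩ := Option.ne_none_iff_exists'.mp
    (fun h => h1 ((PySem.List.max?_eq_none_iff l1 (fun x => x)).mp h))
  obtain ⟨q, hq⟩ := Option.ne_none_iff_exists'.mp
    (fun h => h2 ((PySem.List.max?_eq_none_iff l2 (fun x => x)).mp h))
  rw [hp, hq]
  have hpm := PySem.List.max?_mem hp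
  have hqm := PySem.List.max?_mem hq
  have hpmax := PySem.List.max?_isMax hp
  have hqmax := PySem.List.max?_isMax hq
  obtain ⟨y, hy, hxy⟩ := d12 p hpm
  obtain ⟨x, hx, hyx⟩ := d21 q hqm
  have := hqmax y hy
  have := hpmax x hx
  simp only [Option.some_inj]
  omega
theorem pvBfold (a : List Int) (init : List Int) (c : Nat) (h2 : 2 ≤ c) :
    (PySem.List.pyRange 2 (c : Int) 1).foldl
      (fun (st : List Int × Int) k =>
        (st.1 ++ [st.2 + PySem.List.pyGetD a k 0], max st.2 (PySem.List.pyGetD a (k - 1) 0)))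
      (init, PySem.List.pyGetD a 0 0)
    = (init ++ (List.range (c - 2)).map (fun t => pvPmax a t + a.getD (t + 2) 0), pvPmax a (c - 2)) := by
  induction c, h2 using Nat.le_induction with
  | base =>
      have hnil : PySem.List.pyRange 2 ((2 : Nat) : Int) 1 = [] := by
        apply PySem.List.pyRange_one_eq_nil; norm_num
      rw [hnil]
      simp only [List.foldl_nil, Nat.sub_self, List.range_zero, List.map_nil, List.append_nil]
      rw [show ((0:Int) = ((0:Nat) : Int)) from rfl, PySem.List.pyGetD_natCast]
      rfl
  | succ c hc ih =>
      have hsplit : PySem.List.pyRange 2 ((c + 1 : Nat) : Int) 1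
          = PySem.List.pyRange 2 (c : Int) 1 ++ [(c : Int)] := by
        push_cast
        exact PySem.List.pyRange_one_succ_right (by exact_mod_cast hc)
      rw [hsplit, List.foldl_append, ih]
      simp only [List.foldl_cons, List.foldl_nil]
      have hg1 : PySem.List.pyGetD a (c : Int) 0 = a.getD c 0 := PySem.List.pyGetD_natCast a c 0
      have hg2 : PySem.List.pyGetD a ((c : Int) - 1) 0 = a.getD (c - 1) 0 := by
        have : ((c : Int) - 1) = ((c - 1 : Nat) : Int) := by omega
        rw [this]; exact PySem.List.pyGetD_natCast a (c - 1) 0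
      rw [hg1, hg2]
      have e1 : c + 1 - 2 = (c - 2) + 1 := by omega
      have e2 : c - 2 + 2 = c := by omega
      have e3 : c - 2 + 1 = c - 1 := by omega
      simp only [Prod.mk.injEq]
      constructor
      · rw [e1, List.range_succ, List.map_append, ← List.append_assoc]
        simp [e2]
      · rw [e1, pvPmax_succ, e3]
theorem pvIdOne_len (a : List Int) (i : Nat) (h : i < a.length) :
    (pvIdOne a (i : Int)).length = (a.length - i + 1) / 2 := by
  rw [pvIdOne_eq a i h, pvStep2_eq_map]
  simp

theorem pvY0_eq (a : List Int) :
    (PySem.List.pyRange 0 (a.length : Int) 1).foldl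
      (fun acc i => if 2 ≤ (pvIdOne a i).length then acc ++ [pvIdOne a i] else acc) []
    = (List.range (a.length - 2)).map (fun i => pvStep2 (a.drop i)) := by
  rw [PySem.List.foldl_append_ite]
  rw [List.nil_append]
  have hcong : (PySem.List.pyRange 0 (a.length : Int) 1).filter
        (fun i => decide (2 ≤ (pvIdOne a i).length))
      = (PySem.List.pyRange 0 (a.length : Int) 1).filter
        (fun i => decide (i < ((a.length - 2 : Nat) : Int))) := by
    apply List.filter_congr
    intro i hi
    rw [PySem.List.mem_pyRange_one] at hi
    have hi' : i = ((i.toNat : Nat) : Int) := by omega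
    have hlt : i.toNat < a.length := by omega
    rw [hi', pvIdOne_len a i.toNat hlt]
    simp only [decide_eq_decide]
    omega
  rw [hcong]
  have hsplit : PySem.List.pyRange 0 (a.length : Int) 1
      = PySem.List.pyRange 0 ((a.length - 2 : Nat) : Int) 1 ++
        PySem.List.pyRange ((a.length - 2 : Nat) : Int) (a.length : Int) 1 := by
    apply PySem.List.pyRange_one_append
    · positivity
    · exact_mod_cast Nat.sub_le a.length 2
  rw [hsplit, List.filter_append]
  have h1 : (PySem.List.pyRange 0 ((a.length - 2 : Nat) : Int) 1).filter
      (fun i => decide (i < ((a.length - 2 : Nat) : Int)))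
      = PySem.List.pyRange 0 ((a.length - 2 : Nat) : Int) 1 := by
    apply List.filter_eq_self.mpr
    intro i hi
    rw [PySem.List.mem_pyRange_one] at hi
    simpa using hi.2
  have h2 : (PySem.List.pyRange ((a.length - 2 : Nat) : Int) (a.length : Int) 1).filter
      (fun i => decide (i < ((a.length - 2 : Nat) : Int))) = [] := by
    apply List.filter_eq_nil_iff.mpr
    intro i hi
    rw [PySem.List.mem_pyRange_one] at hi
    simpa using hi.1
  rw [h1, h2, List.append_nil]
  rw [PySem.List.pyRange_zero_nat, List.map_map]
  apply List.map_congr_left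
  intro k hk
  rw [List.mem_range] at hk
  simp only [Function.comp]
  exact pvIdOne_eq a k (by omega)
theorem pvPairs_eq (a : List Int) (y0 : List (List Int)) :
    (PySem.List.pyRange 0 (a.length : Int) 1).foldl
      (fun acc i => (PySem.List.pyRange 0 (a.length : Int) 1).foldl
        (fun acc2 j => if i + j + 2 < (a.length : Int) then
            acc2 ++ [[PySem.List.pyGetD a i 0, PySem.List.pyGetD a (i + j + 2) 0]] else acc2) acc) y0
    = y0 ++ (PySem.List.pyRange 0 (a.length : Int) 1).flatMap
        (fun i => ((PySem.List.pyRange 0 (a.length : Int) 1).filter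
            (fun j => decide (i + j + 2 < (a.length : Int)))).map
          (fun j => [PySem.List.pyGetD a i 0, PySem.List.pyGetD a (i + j + 2) 0])) := by
  rw [PySem.List.foldl_congr_mem (g := fun acc i =>
      acc ++ ((PySem.List.pyRange 0 (a.length : Int) 1).filter
          (fun j => decide (i + j + 2 < (a.length : Int)))).map
        (fun j => [PySem.List.pyGetD a i 0, PySem.List.pyGetD a (i + j + 2) 0]))]
  · exact PySem.List.foldl_append_eq_flatMap _ _ _
  · intro acc i _
    exact PySem.List.foldl_append_ite _ _ _ _

theorem pvPairsMem (a : List Int) (x : Int) :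
    (x ∈ ((PySem.List.pyRange 0 (a.length : Int) 1).flatMap
        (fun i => ((PySem.List.pyRange 0 (a.length : Int) 1).filter
            (fun j => decide (i + j + 2 < (a.length : Int)))).map
          (fun j => [PySem.List.pyGetD a i 0, PySem.List.pyGetD a (i + j + 2) 0]))).map List.sum)
    ↔ ∃ i k : Nat, i + 2 ≤ k ∧ k < a.length ∧ x = a.getD i 0 + a.getD k 0 := by
  simp only [List.mem_map, List.mem_flatMap, List.mem_filter, PySem.List.mem_pyRange_one,
    decide_eq_true_eq]
  constructor
  · rintro ⟨l, ⟨i, ⟨hi0, hin⟩, j, ⟨⟨hj0, hjn⟩, hcond⟩, rfl⟩, rfl⟩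
    refine ⟨i.toNat, (i + j + 2).toNat, by omega, by omega, ?_⟩
    rw [PySem.List.pyGetD_of_nonneg a 0 hi0, PySem.List.pyGetD_of_nonneg a 0 (show (0:Int) ≤ i + j + 2 by omega)]
    simp
  · rintro ⟨i, k, hik, hkn, rfl⟩
    refine ⟨[PySem.List.pyGetD a (i : Int) 0, PySem.List.pyGetD a ((i : Int) + ((k - i - 2 : Nat) : Int) + 2) 0],
      ⟨(i : Int), ⟨by positivity, by exact_mod_cast by omega⟩,
        ((k - i - 2 : Nat) : Int), ⟨⟨by positivity, by exact_mod_cast by omega⟩, by omega⟩, rfl⟩, ?_⟩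
    have e2 : (i : Int) + ((k - i - 2 : Nat) : Int) + 2 = ((k : Nat) : Int) := by omega
    rw [e2, PySem.List.pyGetD_natCast, PySem.List.pyGetD_natCast]
    simp
theorem pvMain (a : List Int) (hn : 3 ≤ a.length) : max_sum_array a = max_sum_array_alt a := by
  have hchain : (pvChains a).take (a.length - 2)
      = (List.range (a.length - 2)).map (fun i => pvCsum (a.drop i)) := by
    rw [pvChains_eq, ← List.map_take, List.take_range]
    congr 2
    omega
  simp only [max_sum_array, max_sum_array_alt, pvY0_eq, pvPairs_eq, if_pos hn, hchain,
    pvBfold a _ a.length (by omega), List.map_append, List.map_map]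
  congr 1
  apply pvMax_eq_of_dominates
  · simp
    omega
  · simp
    omega
  · intro x hx
    rw [List.mem_append] at hx
    rcases hx with hx | hx
    · refine ⟨x, List.mem_append_left _ ?_, le_refl x⟩
      simpa [pvCsum, Function.comp] using hx
    · obtain ⟨i, k, hik, hkn, rfl⟩ := (pvPairsMem a _).mp hx
      refine ⟨pvPmax a (k - 2) + a.getD k 0, List.mem_append_right _ ?_, ?_⟩
      · refine List.mem_map.mpr ⟨k - 2, List.mem_range.mpr (by omega), ?_⟩
        congr 2
        omega
      · have := pvPmax_le a (k - 2) i (by omega)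
        omega
  · intro y hy
    rw [List.mem_append] at hy
    rcases hy with hy | hy
    · refine ⟨y, List.mem_append_left _ ?_, le_refl y⟩
      simpa [pvCsum, Function.comp] using hy
    · obtain ⟨t, ht, rfl⟩ := List.mem_map.mp hy
      rw [List.mem_range] at ht
      obtain ⟨i, hi, he⟩ := pvPmax_mem a t
      refine ⟨pvPmax a t + a.getD (t + 2) 0, List.mem_append_right _ ?_, le_refl _⟩
      exact (pvPairsMem a _).mpr ⟨i, t + 2, by omega, by omega, by rw [he]⟩

-- ===== VERDICT (by name: the statement is the Claim_ definition above) =====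
theorem max_sum_array_spec : Claim_equal_max_sum_array := by
  intro a _ hpre
  unfold Pre_max_sum_array at hpre
  unfold Spec_max_sum_array
  exact pvMain a hpre
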